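-- pv_equiv track=rewrite | github.com/MinhCreator/python_dev | python/solve_work/cach_nhiet.py | brick_temperatures
-- ===== SOURCE A (Python) =====
-- def brick_temperatures(n: int, a: list[int]) -> int:
--
--     # sort increasing
--     a.sort()
--
--     # cal sum of temperatures
--     s = sum(a)
--
--     a = [0] + a
--
--
--     for i in range(1, (n // 2) + 1):
--
--         s += a[n - i + 1] - a[i]
--
--
--     if n % 2 !=0 :
--
--         s += a[n // 2 + 1]
--
--     return s
-- ===== SOURCE B (Python) =====
-- def brick_temperatures(n: int, a: list[int]) -> int:
--     # same in-place sort mutation as A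
--     a.sort()
--     # every sorted element in [n//2, n) counts twice, those in [n, len) once
--     return 2 * sum(a[n // 2:n]) + sum(a[n:])
-- ===== Notes on version B (the rewrite author's own statement) =====
-- stated objective: simpler
-- what changed: Replaces the padded 1-indexed top-minus-bottom pairing loop and the odd/even special case by a closed-form slice expression 2*sum(a[n//2:n]) + sum(a[n:]) on the sorted list.
-- outside the precondition, e.g. on brick_temperatures(-3, [1, 2]): A returns 5, B returns 3
import Mathlib
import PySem

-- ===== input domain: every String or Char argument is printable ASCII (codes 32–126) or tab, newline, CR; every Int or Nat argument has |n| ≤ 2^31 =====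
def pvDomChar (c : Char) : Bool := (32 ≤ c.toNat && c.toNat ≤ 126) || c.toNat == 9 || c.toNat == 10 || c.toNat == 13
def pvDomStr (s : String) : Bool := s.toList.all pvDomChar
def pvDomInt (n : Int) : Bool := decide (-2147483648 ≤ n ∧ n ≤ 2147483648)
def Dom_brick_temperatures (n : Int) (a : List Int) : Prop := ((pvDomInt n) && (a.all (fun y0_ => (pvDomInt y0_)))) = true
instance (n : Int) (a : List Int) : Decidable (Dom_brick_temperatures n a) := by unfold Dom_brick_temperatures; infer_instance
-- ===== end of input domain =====

-- B replaces A's padded-1-indexed pairing loop and odd/even special case by the closed slice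
-- form 2*sum(a[n//2:n]) + sum(a[n:]) on the sorted list (simpler; return value only — both
-- sort the caller's list in place).

-- ===== PORT A =====
def brick_temperatures (n : Int) (a : List Int) : Int :=
  let sa := PySem.List.sorted a (fun x => x) false
  let s := sa.sum
  let a' := (0 : Int) :: sa
  let s := (PySem.List.pyRange 1 (PySem.Int.floordiv n 2 + 1) 1).foldl
    (fun s i => s + (PySem.List.pyGetD a' (n - i + 1) 0 - PySem.List.pyGetD a' i 0)) s
  if PySem.Int.mod n 2 ≠ 0 then s + PySem.List.pyGetD a' (PySem.Int.floordiv n 2 + 1) 0 else s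

-- ===== PORT B =====
def brick_temperatures_alt (n : Int) (a : List Int) : Int :=
  let sa := PySem.List.sorted a (fun x => x) false
  2 * (PySem.List.slice sa (some (PySem.Int.floordiv n 2)) (some n)).sum
    + (PySem.List.slice sa (some n) none).sum

-- ===== PRECONDITION & SPEC =====
-- Pre_ excludes n > len(a), where A raises IndexError, and negative n, where A's returned
-- value is an artefact of Python negative-index wraparound into the padded list.
def Pre_brick_temperatures (n : Int) (a : List Int) : Prop := 0 ≤ n ∧ n ≤ a.length
instance (n : Int) (a : List Int) : Decidable (Pre_brick_temperatures n a) := by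
  unfold Pre_brick_temperatures; infer_instance
def pvWitness_brick_temperatures : Int × List Int := (2, [3, 1, 4])

def Spec_brick_temperatures (n : Int) (a : List Int) (out : Int) : Prop := out = brick_temperatures_alt n a
instance (n : Int) (a : List Int) (out : Int) : Decidable (Spec_brick_temperatures n a out) := by unfold Spec_brick_temperatures; infer_instance

-- ===== CLAIM (what is proved, stated in full; the proofs are below) =====
def Claim_equal_brick_temperatures : Prop := ∀ (n : Int) (a : List Int), Dom_brick_temperatures n a → Pre_brick_temperatures n a → Spec_brick_temperatures n a (brick_temperatures n a)

-- ===== LEMMAS AND PROOFS =====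

-- fold over range(1, k+1) adding g i is the initial value plus the sum of g(j+1), j < k
lemma foldl_pyRange_add_sum (g : Int → Int) : ∀ (k : Nat) (s0 : Int),
    (PySem.List.pyRange 1 ((k : Int) + 1) 1).foldl (fun s i => s + g i) s0
      = s0 + ((List.range k).map (fun (j : Nat) => g ((j : Int) + 1))).sum := by
  intro k
  induction k with
  | zero => intro s0; simp [PySem.List.pyRange_one_eq_nil]
  | succ k ih =>
      intro s0
      have h : ((k : Int) + 1) + 1 = (((k + 1 : Nat) : Int)) + 1 := by push_cast; ring
      rw [← h, PySem.List.pyRange_one_succ_right (by omega), List.foldl_append, ih,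
        List.range_succ]
      simp
      ring

-- sum of a take extended by one step
lemma sum_take_succ (l : List Int) (k : Nat) :
    (l.take (k + 1)).sum = (l.take k).sum + l.getD k 0 := by
  rw [List.take_add_one, List.sum_append]
  cases h : l[k]? with
  | none => simp [List.getD, h]
  | some x => simp [List.getD, h]

-- prefix sums: Σ_{j<k} l[j] = sum of the first k elements
lemma sum_range_getD (l : List Int) : ∀ (k : Nat),
    ((List.range k).map (fun j => l.getD j 0)).sum = (l.take k).sum := by
  intro k
  induction k with
  | zero => simp
  | succ k ih =>
      rw [List.range_succ, List.map_append, List.sum_append, ih, sum_take_succ]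
      simp

-- suffix sums read backwards: Σ_{j<k} l[m-1-j] = sum of the k elements just below index m
lemma sum_range_getD_rev (l : List Int) (m : Nat) (hm : m ≤ l.length) : ∀ (k : Nat), k ≤ m →
    ((List.range k).map (fun j => l.getD (m - 1 - j) 0)).sum = ((l.drop (m - k)).take k).sum := by
  intro k
  induction k with
  | zero => simp
  | succ k ih =>
      intro hk
      have hidx : m - (k + 1) < l.length := by omega
      have hdrop : l.drop (m - (k + 1)) = l[m - (k + 1)] :: l.drop (m - k) := by
        have hi : m - (k + 1) + 1 = m - k := by omega
        rw [List.drop_eq_getElem_cons hidx, hi]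
      rw [List.range_succ, List.map_append, List.sum_append, ih (by omega), hdrop]
      have : m - 1 - k = m - (k + 1) := by omega
      simp [this, List.getD, List.getElem?_eq_getElem hidx]
      ring

-- the arithmetic heart: on any list l with m ≤ len l, A's loop-and-middle value equals
-- B's closed slice form, over Nat
lemma key_identity (l : List Int) (m : Nat) (hm : m ≤ l.length) :
    l.sum + ((List.range (m / 2)).map (fun j => l.getD (m - 1 - j) 0)).sum
      - ((List.range (m / 2)).map (fun j => l.getD j 0)).sum
      + (if m % 2 ≠ 0 then l.getD (m / 2) 0 else 0)
      = 2 * ((l.drop (m / 2)).take (m - m / 2)).sum + (l.drop m).sum := by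
  have hsplit : (l.take m).sum + (l.drop m).sum = l.sum := by
    rw [← List.sum_append, List.take_append_drop]
  have htk : l.take m = l.take (m / 2) ++ (l.drop (m / 2)).take (m - m / 2) := by
    have h2 : m = m / 2 + (m - m / 2) := by omega
    conv_lhs => rw [h2]
    exact List.take_add
  rw [sum_range_getD, sum_range_getD_rev l m hm (m / 2) (by omega)]
  by_cases hpar : m % 2 = 0
  · have he : m - m / 2 = m / 2 := by omega
    simp only [hpar, ne_eq, not_true_eq_false, if_false]
    have hsum : (l.take m).sum = (l.take (m / 2)).sum + ((l.drop (m / 2)).take (m - m / 2)).sum := by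
      rw [htk, List.sum_append]
    rw [he] at hsum ⊢
    omega
  · have he : m - m / 2 = m / 2 + 1 := by omega
    have hk : m / 2 < l.length := by omega
    have hdrop : l.drop (m / 2) = l[m / 2] :: l.drop (m / 2 + 1) := List.drop_eq_getElem_cons hk
    have hmid : ((l.drop (m / 2)).take (m - m / 2)).sum
        = l[m / 2] + ((l.drop (m / 2 + 1)).take (m / 2)).sum := by
      rw [he, hdrop, List.take_succ_cons, List.sum_cons]
    have htop : ((l.drop (m - m / 2)).take (m / 2)).sum
        = ((l.drop (m / 2 + 1)).take (m / 2)).sum := by rw [he]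
    have hgd : l.getD (m / 2) 0 = l[m / 2] := by
      simp [List.getD, List.getElem?_eq_getElem hk]
    have hsum : (l.take m).sum = (l.take (m / 2)).sum + ((l.drop (m / 2)).take (m - m / 2)).sum := by
      rw [htk, List.sum_append]
    simp only [hpar, ne_eq, not_false_eq_true, if_true]
    omega

-- sum of pointwise differences splits into a difference of sums
lemma sum_map_sub_int (f g : Nat → Int) (xs : List Nat) :
    (xs.map fun j => f j - g j).sum = (xs.map f).sum - (xs.map g).sum := by
  induction xs with
  | nil => simp
  | cons x xs ih => simp only [List.map_cons, List.sum_cons, ih]; ring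

-- indices in A's loop: a'[j+1] with a' = 0 :: l is l[j]
lemma pyGetD_pad (l : List Int) (j : Nat) :
    PySem.List.pyGetD ((0 : Int) :: l) ((j : Int) + 1) 0 = l.getD j 0 := by
  have : ((j : Int) + 1) = ((j + 1 : Nat) : Int) := by push_cast; ring
  rw [this, PySem.List.pyGetD_natCast]
  simp [List.getD]

-- ===== VERDICT (by name: the statement is the Claim_ definition above) =====
theorem brick_temperatures_spec : Claim_equal_brick_temperatures := by
  intro n a _ hpre
  obtain ⟨hn0, hnl⟩ := hpre
  obtain ⟨m, rfl⟩ : ∃ m : Nat, n = (m : Int) := ⟨n.toNat, (Int.toNat_of_nonneg hn0).symm⟩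
  have hm : m ≤ (PySem.List.sorted a (fun x => x) false).length := by
    rw [PySem.List.length_sorted]
    exact_mod_cast hnl
  set l := PySem.List.sorted a (fun x => x) false with hl
  show brick_temperatures (m : Int) a = brick_temperatures_alt (m : Int) a
  unfold brick_temperatures brick_temperatures_alt
  rw [← hl]
  have hfd : PySem.Int.floordiv (m : Int) 2 = ((m / 2 : Nat) : Int) := by
    exact_mod_cast PySem.Int.floordiv_natCast m 2
  have hmod : PySem.Int.mod (m : Int) 2 = ((m % 2 : Nat) : Int) := by
    exact_mod_cast PySem.Int.mod_natCast m 2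
  rw [hfd, hmod]
  dsimp only
  rw [foldl_pyRange_add_sum]
  -- rewrite the loop body's two indexings into getD form
  have hbody : ((List.range (m / 2)).map (fun (j : Nat) =>
        PySem.List.pyGetD ((0 : Int) :: l) ((m : Int) - ((j : Int) + 1) + 1) 0
          - PySem.List.pyGetD ((0 : Int) :: l) ((j : Int) + 1) 0)).sum
      = ((List.range (m / 2)).map (fun j => l.getD (m - 1 - j) 0)).sum
          - ((List.range (m / 2)).map (fun j => l.getD j 0)).sum := by
    rw [← sum_map_sub_int]
    apply congrArg
    apply List.map_congr_left
    intro j hj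
    have hjm : j < m / 2 := List.mem_range.mp hj
    have hcast : (m : Int) - ((j : Int) + 1) + 1 = (((m - j : Nat) : Int)) := by
      have : j ≤ m := by omega
      push_cast [this]; ring
    have hpos : m - j = (m - 1 - j) + 1 := by omega
    rw [hcast, hpos]
    push_cast
    rw [pyGetD_pad l (m - 1 - j), pyGetD_pad l j]
  -- slices in B
  have hs1 : PySem.List.slice l (some ((m / 2 : Nat) : Int)) (some (m : Int))
      = (l.drop (m / 2)).take (m - m / 2) := by
    have := PySem.List.slice_natCast (xs := l) (a := m / 2) (b := m)
    simpa using this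
  have hs2 : PySem.List.slice l (some (m : Int)) none = l.drop m :=
    PySem.List.slice_from_natCast (xs := l) (a := m)
  rw [hs1, hs2]
  have hkey := key_identity l m hm
  by_cases hpar : m % 2 = 0
  · have : ((m % 2 : Nat) : Int) = 0 := by exact_mod_cast hpar
    simp only [this, ne_eq, not_true_eq_false, if_false]
    simp only [hpar, ne_eq, not_true_eq_false, if_false, add_zero] at hkey
    rw [hbody]
    omega
  · have hne : ((m % 2 : Nat) : Int) ≠ 0 := by exact_mod_cast hpar
    simp only [hne, ne_eq, not_false_eq_true, if_true]
    simp only [hpar, ne_eq, not_false_eq_true, if_true] at hkey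
    have hmid : PySem.List.pyGetD ((0 : Int) :: l) (((m / 2 : Nat) : Int) + 1) 0
        = l.getD (m / 2) 0 := pyGetD_pad l (m / 2)
    rw [hbody, hmid]
    omega
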